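-- pv_equiv track=rewrite | github.com/LiorAvrahami/statistical_binary_strings_analysis | graphs_computations.py | orgenise_hierarchy
-- ===== SOURCE A (Python) =====
-- def orgenise_hierarchy(hierarchy):
--     invert_str = lambda target:"".join(["1" if ch == "0" else "0" for ch in target])
--     ret:list = [None]*len(hierarchy)
--     hierarchy = set(hierarchy)
--     for current_index_to_fill in range(len(ret)//2):
--         max_target = max(hierarchy)
--         ret[current_index_to_fill] = max_target
--         ret[current_index_to_fill + len(ret)//2] = invert_str(max_target)
--         hierarchy -= set(ret)
--     return ret
-- ===== SOURCE B (Python) =====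
-- def orgenise_hierarchy(hierarchy):
--     def invert(t):
--         return "".join("1" if ch == "0" else "0" for ch in t)
--     half = len(hierarchy) // 2
--     picks = []
--     consumed = set()
--     for s in sorted(set(hierarchy), reverse=True):
--         if len(picks) == half:
--             break
--         if s in consumed:
--             continue
--         picks.append(s)
--         consumed.add(invert(s))
--     return picks + [invert(p) for p in picks]
-- ===== Notes on version B (the rewrite author's own statement) =====
-- stated objective: faster
-- what changed: A repeatedly calls max() on the remaining set and rebuilds it with a set difference each round (O(n^2*L)); B sorts the distinct strings descending once and does a single scan that skips strings already consumed as inverses (O(n log n * L)).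
-- outside the precondition, e.g. on orgenise_hierarchy(['1']): A returns [None], B returns []; on orgenise_hierarchy(['1', '0', '1', '0']): A raises ValueError, B returns ['1', '0']
import Mathlib
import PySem

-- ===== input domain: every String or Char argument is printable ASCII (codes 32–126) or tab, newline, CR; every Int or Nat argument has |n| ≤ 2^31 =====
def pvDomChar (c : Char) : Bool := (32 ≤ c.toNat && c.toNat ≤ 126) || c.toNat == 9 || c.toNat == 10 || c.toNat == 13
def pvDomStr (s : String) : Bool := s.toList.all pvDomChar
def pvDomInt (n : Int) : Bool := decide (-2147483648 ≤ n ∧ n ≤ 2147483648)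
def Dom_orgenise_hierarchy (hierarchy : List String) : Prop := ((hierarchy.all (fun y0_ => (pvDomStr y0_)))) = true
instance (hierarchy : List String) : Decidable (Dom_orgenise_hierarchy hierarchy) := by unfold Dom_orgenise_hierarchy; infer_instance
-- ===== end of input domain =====

-- B replaces A's repeated max()-extraction from a shrinking set by one descending sort and a single
-- scan that skips strings already consumed as inverses (objective: faster, asymptotic).

-- ===== PORT A =====
-- invert_str = lambda target: "".join(["1" if ch == "0" else "0" for ch in target])
-- (both Pythons define this identical lambda; "".join of the per-char strings = the mapped string)
def pvInvert (t : String) : String :=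
  String.ofList (t.toList.map (fun ch => if ch = '0' then '1' else '0'))

-- the body of A's 'for current_index_to_fill in range(len(ret)//2)' loop
def pvALoop (idxs : List Int) (ret : List (Option String)) (s : PySem.Set String) :
    List (Option String) :=
  match idxs with
  | [] => ret
  | current_index_to_fill :: rest =>
      -- max(hierarchy): ValueError on an empty set (excluded by Pre_); the default is never used there
      let max_target := (PySem.List.max? s (fun y => y)).getD ""
      let ret1 := PySem.List.pySetD ret current_index_to_fill (some max_target)
      let ret2 := PySem.List.pySetD ret1
        (current_index_to_fill + PySem.Int.floordiv ((ret1.length : Int)) 2)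
        (some (pvInvert max_target))
      -- hierarchy -= set(ret)  (order-insensitive uses only: max, membership, filtering)
      let s' := s.filter (fun x => !(ret2.contains (some x)))
      pvALoop rest ret2 s'

def orgenise_hierarchy (hierarchy : List String) : List String :=
  let ret0 : List (Option String) := List.replicate hierarchy.length none
  let s0 : PySem.Set String := PySem.Set.ofList hierarchy
  let ret := pvALoop
    (PySem.List.pyRange 0 (PySem.Int.floordiv ((ret0.length : Int)) 2) 1) ret0 s0
  -- Python returns ret itself; under Pre_ every slot holds a string, so this is exact
  ret.filterMap id

-- ===== PORT B =====
-- def invert(t): return "".join("1" if ch == "0" else "0" for ch in t)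
def pvInvertB (t : String) : String :=
  String.ofList (t.toList.map (fun ch => if ch = '0' then '1' else '0'))

-- the body of B's 'for s in sorted(set(hierarchy), reverse=True)' loop (break/continue as recursion)
def pvBLoop (l : List String) (picks : List String) (consumed : PySem.Set String)
    (half : Nat) : List String :=
  match l with
  | [] => picks
  | s :: rest =>
      if picks.length = half then picks
      else if PySem.Set.contains consumed s then pvBLoop rest picks consumed half
      else pvBLoop rest (picks ++ [s]) (PySem.Set.add consumed (pvInvertB s)) half

def orgenise_hierarchy_alt (hierarchy : List String) : List String :=
  let half := hierarchy.length / 2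
  let picks := pvBLoop
    (PySem.List.sorted (PySem.Set.ofList hierarchy) (fun x => x) true)
    [] PySem.Set.empty half
  picks ++ picks.map pvInvertB

-- ===== PRECONDITION & SPEC =====
-- Helpers for Pre_: a string is "binary" if it consists of '0'/'1' only; a distinct string s is
-- "skipped" if the greedy pairing consumes it as the inverse of a greater string: either some
-- greater non-binary t has invert(t) = s, or its own inverse lies above it and is not itself
-- consumed from above by a non-binary string.
def pvIsBin (s : String) : Bool := s.toList.all (fun c => c == '0' || c == '1')

def pvSkip (S : List String) (s : String) : Bool :=
  pvIsBin s &&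
    (S.any (fun t => !pvIsBin t && (pvInvert t == s) && decide (s < t)) ||
      (S.contains (pvInvert s) && decide (s < pvInvert s) &&
        !S.any (fun u => !pvIsBin u && (pvInvert u == pvInvert s) && decide (pvInvert s < u))))

-- Pre_ excludes odd-length lists (A then returns a list containing None, not a string) and
-- even-length lists on which max() raises ValueError because the distinct strings run out
-- before n/2 picks (fewer than n/2 non-skipped distinct strings).
def Pre_orgenise_hierarchy (hierarchy : List String) : Prop :=
  hierarchy.length % 2 = 0 ∧
    hierarchy.length / 2 ≤
      ((PySem.Set.ofList hierarchy).filter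
        (fun s => !pvSkip (PySem.Set.ofList hierarchy) s)).length
instance (hierarchy : List String) : Decidable (Pre_orgenise_hierarchy hierarchy) := by
  unfold Pre_orgenise_hierarchy; infer_instance

def pvWitness_orgenise_hierarchy : List String := ["10", "0"]

def Spec_orgenise_hierarchy (hierarchy : List String) (out : List String) : Prop :=
  out = orgenise_hierarchy_alt hierarchy
instance (hierarchy : List String) (out : List String) :
    Decidable (Spec_orgenise_hierarchy hierarchy out) := by
  unfold Spec_orgenise_hierarchy; infer_instance

-- ===== CLAIM (what is proved, stated in full; the proofs are below) =====
def Claim_equal_orgenise_hierarchy : Prop :=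
  ∀ (hierarchy : List String), Dom_orgenise_hierarchy hierarchy →
    Pre_orgenise_hierarchy hierarchy →
    Spec_orgenise_hierarchy hierarchy (orgenise_hierarchy hierarchy)

-- ===== LEMMAS AND PROOFS =====

lemma pvInvertB_eq : pvInvertB = pvInvert := rfl

-- the common greedy: k times take the maximum and drop it together with its inverse
def pvG : Nat → List String → List String
  | 0, _ => []
  | k + 1, s =>
      match PySem.List.max? s (fun y => y) with
      | none => []
      | some m => m :: pvG k (s.filter (fun x => decide (x ≠ m ∧ x ≠ pvInvert m)))

lemma pvG_nil (k : Nat) : pvG k [] = [] := by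
  cases k <;> simp [pvG, PySem.List.max?]

lemma pvG_succ {k : Nat} {s : List String} {m : String}
    (h : PySem.List.max? s (fun y => y) = some m) :
    pvG (k + 1) s = m :: pvG k (s.filter (fun x => decide (x ≠ m ∧ x ≠ pvInvert m))) := by
  rw [pvG, h]

lemma max?_id_perm {l l' : List String} (p : l.Perm l') :
    PySem.List.max? l (fun y => y) = PySem.List.max? l' (fun y => y) := by
  cases hl : PySem.List.max? l (fun y => y) with
  | none =>
      have : l = [] := (PySem.List.max?_eq_none_iff _ _).mp hl
      subst this
      have : l' = [] := p.nil_eq.symm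
      subst this; rfl
  | some m =>
      cases hl' : PySem.List.max? l' (fun y => y) with
      | none =>
          have : l' = [] := (PySem.List.max?_eq_none_iff _ _).mp hl'
          subst this
          have : l = [] := p.eq_nil
          subst this; simp [PySem.List.max?] at hl
      | some m' =>
          have hm := PySem.List.max?_mem hl
          have hm' := PySem.List.max?_mem hl'
          have h1 : m ≤ m' := PySem.List.max?_isMax hl' m (p.subset hm)
          have h2 : m' ≤ m := PySem.List.max?_isMax hl m' (p.symm.subset hm')
          exact congrArg some (le_antisymm h1 h2)

lemma max?_id_head {s : String} {rest : List String}
    (h : ∀ y ∈ rest, y < s) :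
    PySem.List.max? (s :: rest) (fun y => y) = some s := by
  cases hl : PySem.List.max? (s :: rest) (fun y => y) with
  | none => simp [PySem.List.max?_eq_none_iff] at hl
  | some m =>
      have hm := PySem.List.max?_mem hl
      have hle : s ≤ m := PySem.List.max?_isMax hl s (by simp)
      rcases List.mem_cons.mp hm with hm | hm
      · exact congrArg some hm
      · exact absurd (lt_of_le_of_lt hle (h m hm)) (lt_irrefl s)

lemma pvG_perm (k : Nat) : ∀ {l l' : List String}, l.Perm l' → pvG k l = pvG k l' := by
  induction k with
  | zero => intro l l' _; rfl
  | succ k ih =>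
      intro l l' p
      rw [pvG, pvG, max?_id_perm p]
      cases PySem.List.max? l' (fun y => y) with
      | none => rfl
      | some m => exact congrArg _ (ih (p.filter _))

lemma invert_toList (t : String) :
    (pvInvert t).toList = t.toList.map (fun c => if c = '0' then '1' else '0') := by
  simp [pvInvert]

lemma bin_invert (t : String) : pvIsBin (pvInvert t) = true := by
  simp only [pvIsBin, invert_toList, List.all_map, List.all_eq_true]
  intro c _
  by_cases h : c = '0' <;> simp [h]

lemma invert_invert {s : String} (h : pvIsBin s = true) : pvInvert (pvInvert s) = s := by
  have e : (pvInvert (pvInvert s)).toList = s.toList := by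
    rw [invert_toList, invert_toList, List.map_map]
    have := List.map_congr_left (l := s.toList)
      (f := (fun c => if c = '0' then '1' else '0') ∘ (fun c => if c = '0' then '1' else '0'))
      (g := id) ?_
    · simpa using this
    · intro c hc
      simp only [pvIsBin, List.all_eq_true] at h
      rcases Bool.or_eq_true_iff.mp (h c hc) with h0 | h1
      · simp [beq_iff_eq.mp h0]
      · simp [beq_iff_eq.mp h1, Char.reduceEq]
  calc pvInvert (pvInvert s) = String.ofList (pvInvert (pvInvert s)).toList := by
        rw [String.ofList_toList]
    _ = String.ofList s.toList := by rw [e]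
    _ = s := String.ofList_toList

lemma bin_of_eq_invert {m t : String} (h : m = pvInvert t) : pvIsBin m = true := by
  rw [h]; exact bin_invert t

lemma pvSkip_iff (S : List String) (s : String) :
    pvSkip S s = true ↔
      (pvIsBin s = true ∧
        ((∃ t ∈ S, pvIsBin t = false ∧ pvInvert t = s ∧ s < t) ∨
          (pvInvert s ∈ S ∧ s < pvInvert s ∧
            ¬∃ u ∈ S, pvIsBin u = false ∧ pvInvert u = pvInvert s ∧ pvInvert s < u))) := by
  simp [pvSkip, List.any_eq_true, List.contains_eq_mem, and_assoc]

lemma skip_max_false {S : List String} {m : String}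
    (hmax : ∀ y ∈ S, y ≤ m) : pvSkip S m = false := by
  rw [← Bool.not_eq_true, pvSkip_iff]
  rintro ⟨-, ⟨t, ht, -, -, hlt⟩ | ⟨hmem, hlt, -⟩⟩
  · exact absurd (hmax t ht) (not_le_of_gt hlt)
  · exact absurd (hmax _ hmem) (not_le_of_gt hlt)

lemma skip_invm {S : List String} {m : String} (hm : m ∈ S)
    (hmax : ∀ y ∈ S, y ≤ m) (h1 : pvInvert m ∈ S) (h2 : pvInvert m ≠ m) :
    pvSkip S (pvInvert m) = true := by
  rw [pvSkip_iff]
  refine ⟨bin_invert m, ?_⟩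
  have hlt : pvInvert m < m := lt_of_le_of_ne (hmax _ h1) h2
  by_cases hbm : pvIsBin m = true
  · refine Or.inr ⟨by rwa [invert_invert hbm], by rwa [invert_invert hbm], ?_⟩
    rintro ⟨u, hu, -, -, hgt⟩
    rw [invert_invert hbm] at hgt
    exact absurd (hmax u hu) (not_le_of_gt hgt)
  · exact Or.inl ⟨m, hm, by simpa using hbm, rfl, hlt⟩

lemma skip_stable {S : List String} {m : String} (hm : m ∈ S)
    (hmax : ∀ y ∈ S, y ≤ m) {s : String} (hsm : s ≠ m)
    (hsi : s ≠ pvInvert m) :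
    pvSkip (S.filter (fun x => decide (x ≠ m ∧ x ≠ pvInvert m))) s = pvSkip S s := by
  rw [Bool.eq_iff_iff, pvSkip_iff, pvSkip_iff]
  have hmemF : ∀ x : String,
      x ∈ S.filter (fun x => decide (x ≠ m ∧ x ≠ pvInvert m))
        ↔ x ∈ S ∧ x ≠ m ∧ x ≠ pvInvert m := by
    intro x; simp [List.mem_filter]
  constructor
  · rintro ⟨hbin, h⟩
    refine ⟨hbin, ?_⟩
    rcases h with ⟨t, ht, hnb, hinv, hlt⟩ | ⟨hmemI, hlt, hnE⟩
    · exact Or.inl ⟨t, ((hmemF t).mp ht).1, hnb, hinv, hlt⟩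
    · have hI := (hmemF (pvInvert s)).mp hmemI
      refine Or.inr ⟨hI.1, hlt, ?_⟩
      rintro ⟨u, hu, hnb, hinv, hgt⟩
      refine hnE ⟨u, (hmemF u).mpr ⟨hu, ?_, ?_⟩, hnb, hinv, hgt⟩
      · rintro rfl
        exact hI.2.2 hinv.symm
      · rintro rfl
        simp [bin_invert] at hnb
  · rintro ⟨hbin, h⟩
    refine ⟨hbin, ?_⟩
    rcases h with ⟨t, ht, hnb, hinv, hlt⟩ | ⟨hmemI, hlt, hnE⟩
    · refine Or.inl ⟨t, (hmemF t).mpr ⟨ht, ?_, ?_⟩, hnb, hinv, hlt⟩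
      · rintro rfl; exact hsi hinv.symm
      · rintro rfl; simp [bin_invert] at hnb
    · have him : pvInvert s ≠ m := by
        rintro he
        have hbm : pvIsBin m = true := bin_of_eq_invert he.symm
        exact hsi (by rw [← he, invert_invert hbin])
      have hii : pvInvert s ≠ pvInvert m := by
        rintro he
        by_cases hbm : pvIsBin m = true
        · exact hsm (by
            have := congrArg pvInvert he
            rwa [invert_invert hbin, invert_invert hbm] at this)
        · refine hnE ⟨m, hm, by simpa using hbm, he.symm, ?_⟩
          have hne : pvInvert s ≠ m := him
          exact lt_of_le_of_ne (hmax _ hmemI) hne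
      refine Or.inr ⟨(hmemF (pvInvert s)).mpr ⟨hmemI, him, hii⟩, hlt, ?_⟩
      rintro ⟨u, hu, hnb, hinv, hgt⟩
      exact hnE ⟨u, ((hmemF u).mp hu).1, hnb, hinv, hgt⟩

lemma navail_step {S : List String} {m : String} (hn : S.Nodup) (hm : m ∈ S)
    (hmax : ∀ y ∈ S, y ≤ m) :
    ((S.filter (fun x => decide (x ≠ m ∧ x ≠ pvInvert m))).filter
        (fun s => !pvSkip (S.filter (fun x => decide (x ≠ m ∧ x ≠ pvInvert m))) s)).length + 1
      = (S.filter (fun s => !pvSkip S s)).length := by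
  have e1 : (S.filter (fun x => decide (x ≠ m ∧ x ≠ pvInvert m))).filter
        (fun s => !pvSkip (S.filter (fun x => decide (x ≠ m ∧ x ≠ pvInvert m))) s)
      = (S.filter (fun x => decide (x ≠ m ∧ x ≠ pvInvert m))).filter
        (fun s => !pvSkip S s) := by
    refine List.filter_congr ?_
    intro x hx
    have hx' : x ∈ S ∧ x ≠ m ∧ x ≠ pvInvert m := by simpa using hx
    rw [skip_stable hm hmax hx'.2.1 hx'.2.2]
  rw [e1, List.filter_filter]
  have e2 : S.filter (fun s => !pvSkip S s && decide (s ≠ m ∧ s ≠ pvInvert m))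
      = (S.filter (fun s => !pvSkip S s)).filter (fun s => decide (s ≠ m)) := by
    rw [List.filter_filter]
    refine List.filter_congr ?_
    intro x hx
    by_cases hxm : x = m
    · subst hxm; simp
    · by_cases hxi : x = pvInvert m
      · subst hxi
        by_cases hmm : pvInvert m = m
        · simp [hmm] at hxm
        · simp [skip_invm hm hmax (by assumption), hmm]
      · simp [hxm, hxi]
  rw [e2]
  have hmemL : m ∈ S.filter (fun s => !pvSkip S s) :=
    List.mem_filter.mpr ⟨hm, by simp [skip_max_false hmax]⟩
  have hnd : (S.filter (fun s => !pvSkip S s)).Nodup := hn.filter _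
  have hsum : (S.filter (fun s => !pvSkip S s)).length
      = ((S.filter (fun s => !pvSkip S s)).filter (fun s => decide (s ≠ m))).length
        + ((S.filter (fun s => !pvSkip S s)).filter
            (fun s => !decide (s ≠ m))).length := by
    exact List.length_eq_length_filter_add _
  have hcnt : ((S.filter (fun s => !pvSkip S s)).filter (fun s => !decide (s ≠ m))).length
      = 1 := by
    have ep : (fun s : String => !decide (s ≠ m)) = (fun s : String => s == m) := by
      funext x; by_cases hx : x = m <;> simp [hx]
    rw [ep]
    have ec : ((S.filter (fun s => !pvSkip S s)).filter (fun s => s == m)).length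
        = (S.filter (fun s => !pvSkip S s)).count m := by
      rw [List.count_eq_countP, List.countP_eq_length_filter]
    rw [ec, List.count_eq_one_of_mem hnd hmemL]
  omega

lemma pvG_length :
    ∀ (k : Nat) (S : List String), S.Nodup →
      k ≤ (S.filter (fun s => !pvSkip S s)).length →
      (pvG k S).length = k := by
  intro k
  induction k with
  | zero => intro S _ _; rfl
  | succ k ih =>
      intro S hn hk
      cases hmax : PySem.List.max? S (fun y => y) with
      | none =>
          have hS : S = [] := (PySem.List.max?_eq_none_iff _ _).mp hmax
          subst hS; simp at hk
      | some m =>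
          have hm := PySem.List.max?_mem hmax
          have hmx := PySem.List.max?_isMax hmax
          rw [pvG_succ hmax]
          have hstep := navail_step hn hm hmx
          rw [List.length_cons, ih _ (hn.filter _) (by omega)]

lemma pvBLoop_spec (l : List String) :
    ∀ (P : List String) (C : PySem.Set String) (k : Nat),
      l.Pairwise (fun a b => b < a) →
      pvBLoop l P C (P.length + k)
        = P ++ pvG k (l.filter (fun x => !(PySem.Set.contains C x))) := by
  induction l with
  | nil => intro P C k _; simp [pvBLoop, pvG_nil]
  | cons s rest ih =>
      intro P C k hpw
      have hhead : ∀ y ∈ rest, y < s := (List.pairwise_cons.mp hpw).1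
      have htail := (List.pairwise_cons.mp hpw).2
      cases k with
      | zero => simp [pvBLoop, pvG]
      | succ k =>
          rw [pvBLoop]
          simp only [pvInvertB_eq]
          rw [if_neg (by omega)]
          by_cases hc : PySem.Set.contains C s
          · rw [if_pos hc, ih P C (k + 1) htail]
            have hm : s ∈ C := by simpa [PySem.Set.contains] using hc
            simp [hm]
          · rw [if_neg hc]
            have h1 := ih (P ++ [s]) (PySem.Set.add C (pvInvert s)) k htail
            rw [List.length_append] at h1
            have h2 : P.length + [s].length + k = P.length + (k + 1) := by simp <;> omega
            rw [h2] at h1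
            rw [h1]
            rw [List.filter_cons_of_pos (by simpa [PySem.Set.contains] using hc)]
            have hmax : PySem.List.max? (s :: rest.filter (fun x => !(PySem.Set.contains C x)))
                (fun y => y) = some s :=
              max?_id_head (fun y hy => hhead y (List.mem_of_mem_filter hy))
            rw [pvG_succ hmax]
            rw [List.filter_cons_of_neg (by simp)]
            rw [List.filter_filter]
            have hfe : ∀ x ∈ rest,
                (!(PySem.Set.contains (PySem.Set.add C (pvInvert s)) x))
                  = (decide (x ≠ s ∧ x ≠ pvInvert s) && !(PySem.Set.contains C x)) := by
              intro x hx
              have hxs : x ≠ s := ne_of_lt (hhead x hx)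
              by_cases hxc : PySem.Set.contains C x <;>
                by_cases hxi : x = pvInvert s <;>
                  simp [PySem.Set.contains, PySem.Set.mem_add, hxi, hxs]
            rw [← List.filter_congr hfe]
            simp

lemma pvALoop_spec :
    ∀ (k : Nat) (P S : List String) (h : Nat),
      (pvG k S).length = k →
      (∀ x ∈ S, x ∉ P ∧ x ∉ P.map pvInvert) →
      P.length + k = h →
      pvALoop ((List.range' P.length k).map (fun n : Nat => (n : Int)))
        (P.map some ++ List.replicate (h - P.length) none
          ++ P.map (fun p => some (pvInvert p)) ++ List.replicate (h - P.length) none)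
        S
      = (P ++ pvG k S).map some ++ (P ++ pvG k S).map (fun p => some (pvInvert p)) := by
  intro k
  induction k with
  | zero =>
      intro P S h _ _ hh
      have h0 : h - P.length = 0 := by omega
      simp [h0, pvALoop, pvG]
  | succ k ih =>
      intro P S h hG hmem hh
      cases hmax : PySem.List.max? S (fun y => y) with
      | none =>
          rw [pvG, hmax] at hG
          simp at hG
      | some m =>
      have hG' : (pvG k (S.filter (fun x => decide (x ≠ m ∧ x ≠ pvInvert m)))).length = k := by
        rw [pvG_succ hmax] at hG
        simpa using hG
      have hrep : h - P.length = k + 1 := by omega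
      rw [hrep, List.range'_succ, List.map_cons, pvALoop, hmax]
      simp only [Option.getD_some, List.append_assoc]
      -- first assignment: ret[i] = max_target
      have e1 : PySem.List.pySetD
          (P.map some ++ (List.replicate (k + 1) none
            ++ (P.map (fun p => some (pvInvert p)) ++ List.replicate (k + 1) none)))
          ((P.length : Int)) (some m)
          = P.map some ++ (some m :: (List.replicate k none
              ++ (P.map (fun p => some (pvInvert p)) ++ List.replicate (k + 1) none))) := by
        rw [PySem.List.pySetD_natCast,
          List.set_append_right _ _ (by simp),
          List.replicate_succ]
        simp
      rw [e1]
      -- len(ret)//2 = h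
      have elen : (P.map some ++ (some m :: (List.replicate k none
            ++ (P.map (fun p => some (pvInvert p)) ++ List.replicate (k + 1) none)))).length
          = 2 * h := by
        simp; omega
      have ediv : PySem.Int.floordiv (((2 * h : Nat) : Int)) 2 = (h : Int) := by
        have e2 : (2 : Int) = ((2 : Nat) : Int) := by norm_num
        rw [e2, PySem.Int.floordiv_natCast]
        norm_num
      -- second assignment: ret[i + len(ret)//2] = invert_str(max_target)
      have e3 : PySem.List.pySetD
          (P.map some ++ (some m :: (List.replicate k none
            ++ (P.map (fun p => some (pvInvert p)) ++ List.replicate (k + 1) none))))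
          ((P.length : Int) + (h : Int)) (some (pvInvert m))
          = P.map some ++ (some m :: (List.replicate k none
              ++ (P.map (fun p => some (pvInvert p))
                  ++ (some (pvInvert m) :: List.replicate k none)))) := by
        have ecast : ((P.length : Int) + (h : Int)) = ((P.length + h : Nat) : Int) := by
          push_cast; ring
        rw [ecast, PySem.List.pySetD_natCast,
          List.set_append_right _ _ (by simp)]
        have eo1 : P.length + h - (P.map some).length = (P.length + k) + 1 := by
          simp; omega
        rw [eo1, List.set_cons_succ,
          List.set_append_right _ _ (by simp)]
        have eo2 : P.length + k - (List.replicate k (none : Option String)).length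
            = P.length := by simp
        rw [eo2, List.set_append_right _ _ (by simp), List.replicate_succ]
        simp
      rw [elen, ediv, e3]
      -- hierarchy -= set(ret): only m and invert(m) are newly removed
      have eS : S.filter (fun x =>
            !((P.map some ++ (some m :: (List.replicate k none
              ++ (P.map (fun p => some (pvInvert p))
                  ++ (some (pvInvert m) :: List.replicate k none))))).contains (some x)))
          = S.filter (fun x => decide (x ≠ m ∧ x ≠ pvInvert m)) := by
        refine List.filter_congr ?_
        intro x hx
        obtain ⟨hp1, hp2⟩ := hmem x hx
        simp only [List.mem_map] at hp2
        push_neg at hp2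
        by_cases h1 : x = m <;> by_cases h2 : x = pvInvert m <;>
          simp [List.contains_eq_mem, List.mem_append, List.mem_replicate,
            hp1, h1, h2] <;> exact hp2
      rw [eS]
      have hmem' : ∀ x ∈ S.filter (fun x => decide (x ≠ m ∧ x ≠ pvInvert m)),
          x ∉ P ++ [m] ∧ x ∉ (P ++ [m]).map pvInvert := by
        intro x hx
        have hxS := List.mem_of_mem_filter hx
        have hxp := List.of_mem_filter hx
        simp only [decide_eq_true_eq] at hxp
        obtain ⟨hp1, hp2⟩ := hmem x hxS
        simp only [List.map_append, List.mem_append, List.mem_singleton, List.map_cons,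
          List.map_nil]
        push_neg
        exact ⟨⟨hp1, hxp.1⟩, by simpa [hxp.2] using hp2⟩
      have hh' : (P ++ [m]).length + k = h := by simp; omega
      have hIH := ih (P ++ [m]) (S.filter (fun x => decide (x ≠ m ∧ x ≠ pvInvert m))) h
        hG' hmem' hh'
      have hk' : h - (P ++ [m]).length = k := by simp; omega
      rw [hk'] at hIH
      simp only [List.length_append, List.length_singleton, List.append_assoc] at hIH
      rw [pvG_succ hmax]
      have eshape : P.map some ++ (some m :: (List.replicate k none
            ++ (P.map (fun p => some (pvInvert p))
                ++ (some (pvInvert m) :: List.replicate k none))))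
          = (P ++ [m]).map some ++ (List.replicate k none
              ++ ((P ++ [m]).map (fun p => some (pvInvert p)) ++ List.replicate k none)) := by
        simp [List.append_assoc]
      rw [eshape, hIH]
      simp [List.append_assoc]

lemma orgA (hierarchy : List String)
    (hev : hierarchy.length % 2 = 0)
    (hG : (pvG (hierarchy.length / 2) (PySem.Set.ofList hierarchy)).length
        = hierarchy.length / 2) :
    orgenise_hierarchy hierarchy
      = pvG (hierarchy.length / 2) (PySem.Set.ofList hierarchy)
        ++ (pvG (hierarchy.length / 2) (PySem.Set.ofList hierarchy)).map pvInvert := by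
  simp only [orgenise_hierarchy]
  have e0 : (List.replicate hierarchy.length (none : Option String)).length
      = hierarchy.length := by simp
  rw [e0]
  have ediv : PySem.Int.floordiv ((hierarchy.length : Int)) 2
      = ((hierarchy.length / 2 : Nat) : Int) := by
    have e2 : (2 : Int) = ((2 : Nat) : Int) := by norm_num
    rw [e2, PySem.Int.floordiv_natCast]
  rw [ediv]
  have erange : PySem.List.pyRange 0 ((hierarchy.length / 2 : Nat) : Int) 1
      = (List.range' 0 (hierarchy.length / 2)).map (fun n : Nat => (n : Int)) := by
    rw [PySem.List.pyRange_one]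
    have e1 : (((hierarchy.length / 2 : Nat) : Int) - 0).toNat = hierarchy.length / 2 := by
      omega
    rw [e1, List.range_eq_range']
    exact List.map_congr_left (by intro x _; simp)
  have hA := pvALoop_spec (hierarchy.length / 2) [] (PySem.Set.ofList hierarchy)
    (hierarchy.length / 2) hG (by simp) (by simp)
  simp only [List.map_nil, List.nil_append, List.append_nil, List.length_nil,
    Nat.sub_zero] at hA
  have erep : List.replicate hierarchy.length (none : Option String)
      = List.replicate (hierarchy.length / 2) none
        ++ List.replicate (hierarchy.length / 2) none := by
    rw [← List.replicate_add]
    congr 1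
    omega
  rw [erange, erep, hA]
  simp [List.filterMap_map]

lemma orgB (hierarchy : List String) :
    orgenise_hierarchy_alt hierarchy
      = pvG (hierarchy.length / 2) (PySem.Set.ofList hierarchy)
        ++ (pvG (hierarchy.length / 2) (PySem.Set.ofList hierarchy)).map pvInvert := by
  simp only [orgenise_hierarchy_alt, pvInvertB_eq]
  have hperm : (PySem.List.sorted (PySem.Set.ofList hierarchy) (fun x => x) true).Perm
      (PySem.Set.ofList hierarchy) :=
    PySem.List.sorted_perm (PySem.Set.ofList hierarchy) (fun x => x) true
  have hpw : (PySem.List.sorted (PySem.Set.ofList hierarchy) (fun x => x) true).Pairwise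
      (fun a b => b < a) := by
    have h1 : (PySem.List.sorted (PySem.Set.ofList hierarchy) (fun x => x) true).Pairwise
        (fun a b => b ≤ a) :=
      PySem.List.sorted_pairwise_rev (PySem.Set.ofList hierarchy) (fun x => x)
    have h2 : (PySem.List.sorted (PySem.Set.ofList hierarchy) (fun x => x) true).Nodup :=
      hperm.nodup_iff.mpr (PySem.Set.nodup_ofList hierarchy)
    exact (h1.and h2).imp (fun hab => lt_of_le_of_ne hab.1 (Ne.symm hab.2))
  have hB := pvBLoop_spec (PySem.List.sorted (PySem.Set.ofList hierarchy) (fun x => x) true)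
    [] PySem.Set.empty (hierarchy.length / 2) hpw
  simp only [List.length_nil, Nat.zero_add, List.nil_append] at hB
  have hfilt : (PySem.List.sorted (PySem.Set.ofList hierarchy) (fun x => x) true).filter
      (fun x => !(PySem.Set.contains PySem.Set.empty x))
      = PySem.List.sorted (PySem.Set.ofList hierarchy) (fun x => x) true := by
    simp [PySem.Set.contains, PySem.Set.empty]
  rw [hfilt] at hB
  rw [hB, pvG_perm _ hperm]

-- ===== VERDICT (by name: the statement is the Claim_ definition above) =====
theorem orgenise_hierarchy_spec : Claim_equal_orgenise_hierarchy := by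
  intro hierarchy _ hpre
  unfold Spec_orgenise_hierarchy
  have hG := pvG_length (hierarchy.length / 2) (PySem.Set.ofList hierarchy)
    (PySem.Set.nodup_ofList hierarchy) hpre.2
  rw [orgA hierarchy hpre.1 hG, orgB hierarchy]
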